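-- pv_equiv track=rewrite | github.com/StevedeRose/AdventOfCode | day_25.py | get_component_size
-- ===== SOURCE A (Python) =====
-- def get_component_size(graph, root, banned_edges):
--     """
--     Calcule la taille d'une composante connexe après avoir écarté les arêtes interdites.
--     Utilise une approche itérative au lieu d'une approche récursive.
--     """
--     stack = [root]
--     seen_nodes = {root}
--
--     while stack:
--         node = stack.pop()
--         new_nodes = [neighbor for neighbor in graph[node]
--                      if neighbor not in seen_nodes and (node, neighbor) not in banned_edges
--                      and (neighbor, node) not in banned_edges]
--         seen_nodes.update(new_nodes)
--         stack.extend(new_nodes)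
--
--     return len(seen_nodes)
-- ===== SOURCE B (Python) =====
-- def get_component_size(graph, root, banned_edges):
--     """Level-synchronous BFS: expand the whole frontier one level at a time
--     instead of popping single nodes from a stack."""
--     seen = {root}
--     frontier = [root]
--     while frontier:
--         next_frontier = []
--         for node in frontier:
--             new = [nb for nb in graph[node]
--                    if nb not in seen and (node, nb) not in banned_edges
--                    and (nb, node) not in banned_edges]
--             seen.update(new)
--             next_frontier.extend(new)
--         frontier = next_frontier
--     return len(seen)
-- ===== Notes on version B (the rewrite author's own statement) =====
-- stated objective: alternative
-- what changed: Replaces the explicit-stack DFS (pop one node at a time, push its unseen allowed neighbors) by a level-synchronous BFS that expands the whole frontier one level per iteration; the proof shows the traversal order does not affect the visited set.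
import Mathlib
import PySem

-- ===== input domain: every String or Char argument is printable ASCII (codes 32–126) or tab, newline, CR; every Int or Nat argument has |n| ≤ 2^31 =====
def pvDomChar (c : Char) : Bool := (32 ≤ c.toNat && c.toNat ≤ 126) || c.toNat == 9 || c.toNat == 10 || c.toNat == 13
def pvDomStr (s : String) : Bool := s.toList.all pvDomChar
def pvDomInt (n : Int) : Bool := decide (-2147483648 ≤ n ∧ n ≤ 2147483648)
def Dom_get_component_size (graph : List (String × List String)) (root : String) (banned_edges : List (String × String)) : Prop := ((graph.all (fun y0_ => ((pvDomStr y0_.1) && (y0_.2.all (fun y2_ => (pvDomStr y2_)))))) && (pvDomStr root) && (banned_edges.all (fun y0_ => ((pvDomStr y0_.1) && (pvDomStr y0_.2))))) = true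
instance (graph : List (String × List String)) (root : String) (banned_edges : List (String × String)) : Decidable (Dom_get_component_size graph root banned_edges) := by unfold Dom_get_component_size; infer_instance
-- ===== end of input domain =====

-- B replaces A's explicit-stack DFS by a level-synchronous BFS (the whole frontier is
-- expanded one level at a time); alternative traversal of the same cost, not faster.


-- ===== PORT A =====
-- A's DFS loop: the stack is kept top-first (Python pops from the END; here the head is the
-- top, so `stack.extend(new_nodes)` becomes `new.reverse ++ rest`).  Python's `graph[node]`
-- raises KeyError when node has no adjacency entry; the port treats such a node as having no
-- neighbours and goes on — on those inputs Python A raises, so no value of A is being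
-- matched there.  The while-loop is made structural with a fuel counter that the proof
-- shows is never exhausted.
def gcsDfs (graph : List (String × List String)) (banned_edges : List (String × String)) :
    Nat → List String → PySem.Set String → PySem.Set String
  | 0, _, seen => seen
  | _ + 1, [], seen => seen
  | fuel + 1, node :: rest, seen =>
      match graph.lookup node with
      | none => gcsDfs graph banned_edges fuel rest seen   -- Python: KeyError; no neighbours
      | some ns =>
        let new := ns.filter (fun n => !(PySem.Set.contains seen n)
            && !(banned_edges.contains (node, n)) && !(banned_edges.contains (n, node)))
        gcsDfs graph banned_edges fuel (new.reverse ++ rest) (PySem.Set.update seen new)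

def get_component_size (graph : List (String × List String)) (root : String) (banned_edges : List (String × String)) : Int :=
  ((gcsDfs graph banned_edges
      (((graph.map (fun p => p.2.length)).sum + 2) * ((graph.map (fun p => p.2.length)).sum + 2))
      [root] (PySem.Set.ofList [root])).length : Int)

-- ===== PORT B =====
-- Source B's inner `for node in frontier` loop: expands one whole level, returning the grown
-- seen set and the next frontier.  As in port A, Python's `graph[node]` raises KeyError for
-- a node without adjacency entry (outside Pre_); the port goes on with no neighbours there.
def gcsBfsLevel (graph : List (String × List String)) (banned_edges : List (String × String)) :
    List String → PySem.Set String → PySem.Set String × List String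
  | [], seen => (seen, [])
  | node :: rest, seen =>
      match graph.lookup node with
      | none => gcsBfsLevel graph banned_edges rest seen   -- Python: KeyError; no neighbours
      | some ns =>
        let new := ns.filter (fun n => !(PySem.Set.contains seen n)
            && !(banned_edges.contains (node, n)) && !(banned_edges.contains (n, node)))
        let r := gcsBfsLevel graph banned_edges rest (PySem.Set.update seen new)
        (r.1, new ++ r.2)

-- Source B's outer `while frontier` loop, made structural with a fuel counter that the proof
-- shows is never exhausted
def gcsBfs (graph : List (String × List String)) (banned_edges : List (String × String)) :
    Nat → List String → PySem.Set String → PySem.Set String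
  | 0, _, seen => seen
  | _ + 1, [], seen => seen
  | f + 1, node :: rest, seen =>
      let r := gcsBfsLevel graph banned_edges (node :: rest) seen
      gcsBfs graph banned_edges f r.2 r.1

def get_component_size_alt (graph : List (String × List String)) (root : String) (banned_edges : List (String × String)) : Int :=
  ((gcsBfs graph banned_edges ((graph.map (fun p => p.2.length)).sum + 2)
      [root] (PySem.Set.ofList [root])).length : Int)

-- ===== PRECONDITION & SPEC =====
-- one-shot expansion used only to STATE the precondition (not by either port): add to S the
-- allowed neighbours of every adjacency entry whose key is in S
def gcsStep (graph : List (String × List String)) (banned_edges : List (String × String))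
    (S : PySem.Set String) : PySem.Set String :=
  PySem.Set.update S (graph.flatMap (fun p =>
    if PySem.Set.contains S p.1 then
      p.2.filter (fun n => !(banned_edges.contains (p.1, n)) && !(banned_edges.contains (n, p.1)))
    else []))

-- Pre_ excludes (a) inputs on which Python A raises KeyError — some node reachable from root
-- over non-banned edges has no adjacency entry (the iterated one-shot expansion below reaches
-- its fixed point, the set of reachable nodes, within #edges+1 rounds) — and (b) association
-- lists with duplicate keys, which do not represent a Python dict.
def Pre_get_component_size (graph : List (String × List String)) (root : String) (banned_edges : List (String × String)) : Prop :=
  (graph.map Prod.fst).Nodup ∧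
    ∀ x ∈ (gcsStep graph banned_edges)^[(graph.flatMap (fun p => p.2)).length + 1]
      (PySem.Set.ofList [root]), x ∈ graph.map Prod.fst
instance (graph : List (String × List String)) (root : String) (banned_edges : List (String × String)) : Decidable (Pre_get_component_size graph root banned_edges) := by unfold Pre_get_component_size; infer_instance

def pvWitness_get_component_size : (List (String × List String)) × String × (List (String × String)) :=
  ([("a", ["b"]), ("b", ["a", "c"]), ("c", [])], "a", [("b", "c")])

def Spec_get_component_size (graph : List (String × List String)) (root : String) (banned_edges : List (String × String)) (out : Int) : Prop := out = get_component_size_alt graph root banned_edges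
instance (graph : List (String × List String)) (root : String) (banned_edges : List (String × String)) (out : Int) : Decidable (Spec_get_component_size graph root banned_edges out) := by unfold Spec_get_component_size; infer_instance

-- ===== CLAIM (what is proved, stated in full; the proofs are below) =====
def Claim_equal_get_component_size : Prop := ∀ (graph : List (String × List String)) (root : String) (banned_edges : List (String × String)), Dom_get_component_size graph root banned_edges → Pre_get_component_size graph root banned_edges → Spec_get_component_size graph root banned_edges (get_component_size graph root banned_edges)

-- ===== LEMMAS AND PROOFS =====

-- a set is "closed" when it is stable under every allowed edge of the adjacency table
def gcsClosed (graph : List (String × List String)) (banned_edges : List (String × String)) (C : List String) : Prop :=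
  ∀ p ∈ graph, p.1 ∈ C → ∀ n ∈ p.2,
    banned_edges.contains (p.1, n) = false → banned_edges.contains (n, p.1) = false → n ∈ C

theorem gcs_lookup_mem {graph : List (String × List String)} {k : String} {ns : List String}
    (h : graph.lookup k = some ns) : (k, ns) ∈ graph := by
  induction graph with
  | nil => simp [List.lookup] at h
  | cons p rest ih =>
      rw [List.lookup] at h
      by_cases hk : k = p.1
      · subst hk
        simp only [beq_self_eq_true] at h
        obtain ⟨a, b⟩ := p
        simp only [Option.some.injEq] at h
        subst h
        exact List.mem_cons_self
      · rw [beq_eq_false_iff_ne.2 hk] at h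
        right; exact ih h

theorem gcs_lookup_of_mem {graph : List (String × List String)} {k : String} {ns : List String}
    (hnd : (graph.map Prod.fst).Nodup) (h : (k, ns) ∈ graph) : graph.lookup k = some ns := by
  induction graph with
  | nil => simp at h
  | cons p rest ih =>
      simp only [List.map_cons, List.nodup_cons] at hnd
      rcases List.mem_cons.1 h with h1 | h1
      · subst h1; simp [List.lookup]
      · have hne : k ≠ p.1 := by
          intro he
          exact hnd.1 (he ▸ (List.mem_map.2 ⟨(k, ns), h1, rfl⟩))
        rw [List.lookup, beq_eq_false_iff_ne.2 hne]
        exact ih hnd.2 h1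

theorem gcs_lookup_isSome {graph : List (String × List String)} {k : String}
    (h : k ∈ graph.map Prod.fst) : ∃ ns, graph.lookup k = some ns := by
  induction graph with
  | nil => simp at h
  | cons p rest ih =>
      by_cases hk : k = p.1
      · exact ⟨p.2, by simp [List.lookup, hk]⟩
      · rw [List.lookup, beq_eq_false_iff_ne.2 hk]
        exact ih (by simpa [hk, eq_comm] using h)

theorem gcs_nodup_length_le {l m : List String} (hnd : l.Nodup) (hsub : ∀ x ∈ l, x ∈ m) :
    l.length ≤ m.length := by
  calc l.length = l.toFinset.card := (List.toFinset_card_of_nodup hnd).symm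
    _ ≤ m.toFinset.card := Finset.card_le_card (fun x hx => by
        simp only [List.mem_toFinset] at *; exact hsub x hx)
    _ ≤ m.length := m.toFinset_card_le

-- the DFS master lemma: the loop result is the reachability closure of {root}
theorem gcsDfs_spec (graph : List (String × List String)) (banned_edges : List (String × String))
    (hnd : (graph.map Prod.fst).Nodup)
    (U : List String) (hU : ∀ p ∈ graph, ∀ n ∈ p.2, n ∈ U)
    (fuel : Nat) (stack : List String) (seen : List String)
    (hsnd : seen.Nodup)
    (hsk : ∀ x ∈ seen, x ∈ U)
    (hst : ∀ x ∈ stack, x ∈ seen)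
    (hexp : ∀ v ∈ seen, v ∈ stack ∨ ∀ p ∈ graph, p.1 = v → ∀ n ∈ p.2,
      banned_edges.contains (v, n) = false → banned_edges.contains (n, v) = false → n ∈ seen)
    (hfuel : (U.length - seen.length) * ((graph.map (fun p => p.2.length)).sum + 1)
      + stack.length < fuel) :
    (gcsDfs graph banned_edges fuel stack seen).Nodup ∧
    (∀ x ∈ seen, x ∈ gcsDfs graph banned_edges fuel stack seen) ∧
    gcsClosed graph banned_edges (gcsDfs graph banned_edges fuel stack seen) ∧
    (∀ C, gcsClosed graph banned_edges C → (∀ x ∈ seen, x ∈ C) →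
      ∀ x ∈ gcsDfs graph banned_edges fuel stack seen, x ∈ C) := by
  induction fuel generalizing stack seen with
  | zero => exact absurd hfuel (by omega)
  | succ f ih =>
      cases stack with
      | nil =>
          have hres : gcsDfs graph banned_edges (f + 1) [] seen = seen := rfl
          rw [hres]
          refine ⟨hsnd, fun x hx => hx, ?_, fun C _ hs x hx => hs x hx⟩
          intro p hp hpin n hn hb1 hb2
          rcases hexp p.1 hpin with h | h
          · simp at h
          · exact h p hp rfl n hn hb1 hb2
      | cons node rest =>
          have hnodeseen : node ∈ seen := hst node List.mem_cons_self
          cases hlk0 : graph.lookup node with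
          | none =>
              have hstep : gcsDfs graph banned_edges (f + 1) (node :: rest) seen
                  = gcsDfs graph banned_edges f rest seen := by
                simp only [gcsDfs, hlk0]
              have hexp' : ∀ v ∈ seen, v ∈ rest ∨ ∀ p ∈ graph, p.1 = v → ∀ n ∈ p.2,
                  banned_edges.contains (v, n) = false → banned_edges.contains (n, v) = false →
                    n ∈ seen := by
                intro v hv
                rcases hexp v hv with h | h
                · rcases List.mem_cons.1 h with h1 | h1
                  · subst h1
                    right
                    intro p hp hpeq _ _ _ _
                    exfalso
                    obtain ⟨ns', hns'⟩ := gcs_lookup_isSome (graph := graph)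
                      (List.mem_map.2 ⟨p, hp, rfl⟩)
                    rw [hpeq] at hns'
                    rw [hns'] at hlk0
                    simp at hlk0
                  · exact Or.inl h1
                · exact Or.inr h
              have hfuel' : (U.length - seen.length) *
                  ((graph.map (fun p => p.2.length)).sum + 1) + rest.length < f := by
                simp only [List.length_cons] at hfuel
                omega
              obtain ⟨r1, r2, r3, r4⟩ := ih rest seen hsnd hsk
                (fun x hx => hst x (List.mem_cons_of_mem _ hx)) hexp' hfuel'
              rw [hstep]
              exact ⟨r1, r2, r3, r4⟩
          | some ns =>
          have hlk : graph.lookup node = some ns := hlk0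
          have hmemg : (node, ns) ∈ graph := gcs_lookup_mem hlk
          set new := ns.filter (fun n => !(PySem.Set.contains seen n)
              && !(banned_edges.contains (node, n)) && !(banned_edges.contains (n, node)))
            with hnewdef
          have hstep : gcsDfs graph banned_edges (f + 1) (node :: rest) seen
              = gcsDfs graph banned_edges f (new.reverse ++ rest) (PySem.Set.update seen new) := by
            simp only [gcsDfs, hlk]
            rfl
          have hnewns : ∀ n ∈ new, n ∈ ns := fun n hn => List.mem_of_mem_filter hn
          have hnewprops : ∀ n ∈ new, PySem.Set.contains seen n = false ∧
              banned_edges.contains (node, n) = false ∧ banned_edges.contains (n, node) = false := by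
            intro n hn
            have := List.of_mem_filter hn
            simp only [Bool.and_eq_true, Bool.not_eq_true'] at this
            exact ⟨this.1.1, this.1.2, this.2⟩
          have hnewnotseen : ∀ n ∈ new, n ∉ seen := by
            intro n hn hns
            have := (hnewprops n hn).1
            rw [(PySem.Set.contains_iff seen n).2 hns] at this
            exact absurd this (by simp)
          have hnewU : ∀ n ∈ new, n ∈ U :=
            fun n hn => hU (node, ns) hmemg n (hnewns n hn)
          -- invariants for the recursive call
          have hsnd' : (PySem.Set.update seen new).Nodup := PySem.Set.nodup_update seen new hsnd
          have hsk' : ∀ x ∈ PySem.Set.update seen new, x ∈ U := by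
            intro x hx
            rcases (PySem.Set.mem_update seen new x).1 hx with h | h
            · exact hsk x h
            · exact hnewU x h
          have hst' : ∀ x ∈ new.reverse ++ rest, x ∈ PySem.Set.update seen new := by
            intro x hx
            rcases List.mem_append.1 hx with h | h
            · exact (PySem.Set.mem_update seen new x).2 (Or.inr (List.mem_reverse.1 h))
            · exact (PySem.Set.mem_update seen new x).2 (Or.inl (hst x (List.mem_cons_of_mem _ h)))
          have hexp' : ∀ v ∈ PySem.Set.update seen new, v ∈ new.reverse ++ rest ∨
              ∀ p ∈ graph, p.1 = v → ∀ n ∈ p.2,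
                banned_edges.contains (v, n) = false → banned_edges.contains (n, v) = false →
                  n ∈ PySem.Set.update seen new := by
            intro v hv
            rcases (PySem.Set.mem_update seen new v).1 hv with hvs | hvn
            · rcases hexp v hvs with h | h
              · rcases List.mem_cons.1 h with h1 | h1
                · subst h1
                  right
                  intro p hp hpeq n hn hb1 hb2
                  have hlkp : graph.lookup p.1 = some p.2 := gcs_lookup_of_mem hnd hp
                  rw [hpeq, hlk] at hlkp
                  have hns : n ∈ ns := by
                    have h2 : ns = p.2 := Option.some.inj hlkp
                    exact h2 ▸ hn
                  by_cases hseen : n ∈ seen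
                  · exact (PySem.Set.mem_update seen new n).2 (Or.inl hseen)
                  · refine (PySem.Set.mem_update seen new n).2 (Or.inr ?_)
                    rw [hnewdef]
                    refine List.mem_filter.2 ⟨hns, ?_⟩
                    have hc : PySem.Set.contains seen n = false := by
                      rw [← Bool.not_eq_true]
                      intro hcc
                      exact hseen ((PySem.Set.contains_iff seen n).1 hcc)
                    simp only [Bool.and_eq_true, Bool.not_eq_true']
                    exact ⟨⟨hc, hb1⟩, hb2⟩
                · exact Or.inl (List.mem_append_right _ h1)
              · right
                intro p hp hpeq n hn hb1 hb2
                exact (PySem.Set.mem_update seen new n).2 (Or.inl (h p hp hpeq n hn hb1 hb2))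
            · exact Or.inl (List.mem_append_left _ (List.mem_reverse.2 hvn))
          -- fuel bound for the recursive call
          have hTns : ns.length ≤ (graph.map (fun p => p.2.length)).sum :=
            List.single_le_sum (fun x _ => Nat.zero_le x) _
              (List.mem_map.2 ⟨(node, ns), hmemg, rfl⟩)
          have hnewlen : new.length ≤ ns.length := by rw [hnewdef]; exact List.length_filter_le _ _
          have hfuel' : (U.length - (PySem.Set.update seen new).length) *
              ((graph.map (fun p => p.2.length)).sum + 1) + (new.reverse ++ rest).length < f := by
            rw [List.length_append, List.length_reverse]
            cases hne : new with
            | nil =>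
                have hupd : PySem.Set.update seen ([] : List String) = seen := rfl
                rw [hupd]
                have hfuel2 : (U.length - seen.length) *
                    ((List.map (fun p => p.2.length) graph).sum + 1) + rest.length + 1 < f + 1 := by
                  simpa using hfuel
                simp only [List.length_nil]
                omega
            | cons n0 tl =>
                have hn0 : n0 ∈ new := by rw [hne]; exact List.mem_cons_self
                have hgrow : seen.length + 1 ≤ (PySem.Set.update seen new).length := by
                  rw [PySem.Set.update_eq_append_filter, List.length_append]
                  have hmemf : n0 ∈ (PySem.Set.ofList new).filter (fun y => !PySem.Set.contains seen y) := by
                    refine List.mem_filter.2 ⟨(PySem.Set.mem_ofList new n0).2 hn0, ?_⟩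
                    simp only [Bool.not_eq_true']
                    exact (hnewprops n0 hn0).1
                  have := List.length_pos_iff.2 (List.ne_nil_of_mem hmemf)
                  omega
                have hbound : (PySem.Set.update seen new).length ≤ U.length :=
                  gcs_nodup_length_le hsnd' hsk'
                have hmul : ((U.length - (PySem.Set.update seen new).length) + 1) *
                    ((graph.map (fun p => p.2.length)).sum + 1)
                    ≤ (U.length - seen.length) *
                      ((graph.map (fun p => p.2.length)).sum + 1) :=
                  Nat.mul_le_mul_right _ (by omega)
                rw [Nat.add_one_mul] at hmul
                rw [← hne]
                have hfuel2 : (U.length - seen.length) *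
                    ((List.map (fun p => p.2.length) graph).sum + 1) + rest.length + 1 < f + 1 := by
                  simpa using hfuel
                omega
          obtain ⟨r1, r2, r3, r4⟩ := ih (new.reverse ++ rest) (PySem.Set.update seen new)
            hsnd' hsk' hst' hexp' hfuel'
          rw [hstep]
          refine ⟨r1, ?_, r3, ?_⟩
          · intro x hx
            exact r2 x ((PySem.Set.mem_update seen new x).2 (Or.inl hx))
          · intro C hC hs x hx
            refine r4 C hC ?_ x hx
            intro y hy
            rcases (PySem.Set.mem_update seen new y).1 hy with h | h
            · exact hs y h
            · exact hC (node, ns) hmemg (hs node hnodeseen) y (hnewns y h)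
                (hnewprops y h).2.1 (hnewprops y h).2.2

-- "v is fully expanded into S": every allowed neighbour of v (over any adjacency entry
-- keyed v) is already in S
def gcsExp (graph : List (String × List String)) (banned_edges : List (String × String))
    (v : String) (S : List String) : Prop :=
  ∀ p ∈ graph, p.1 = v → ∀ n ∈ p.2,
    banned_edges.contains (v, n) = false → banned_edges.contains (n, v) = false → n ∈ S

theorem gcsExp_mono {graph : List (String × List String)} {banned_edges : List (String × String)}
    {v : String} {S S' : List String} (h : gcsExp graph banned_edges v S)
    (hss : ∀ x ∈ S, x ∈ S') : gcsExp graph banned_edges v S' :=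
  fun p hp hpe n hn hb1 hb2 => hss n (h p hp hpe n hn hb1 hb2)

theorem gcsBfsLevel_spec (graph : List (String × List String)) (banned_edges : List (String × String))
    (hnd : (graph.map Prod.fst).Nodup)
    (U : List String) (hU : ∀ p ∈ graph, ∀ n ∈ p.2, n ∈ U)
    (frontier : List String) (seen : List String)
    (hsnd : seen.Nodup) (hsk : ∀ x ∈ seen, x ∈ U) :
    (∃ t, (gcsBfsLevel graph banned_edges frontier seen).1 = seen ++ t) ∧
    (gcsBfsLevel graph banned_edges frontier seen).1.Nodup ∧
    (∀ x ∈ (gcsBfsLevel graph banned_edges frontier seen).1, x ∈ U) ∧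
    (∀ x ∈ (gcsBfsLevel graph banned_edges frontier seen).2,
      x ∈ (gcsBfsLevel graph banned_edges frontier seen).1) ∧
    ((gcsBfsLevel graph banned_edges frontier seen).2 = [] →
      (gcsBfsLevel graph banned_edges frontier seen).1 = seen) ∧
    ((gcsBfsLevel graph banned_edges frontier seen).2 ≠ [] →
      seen.length < (gcsBfsLevel graph banned_edges frontier seen).1.length) ∧
    (∀ C, gcsClosed graph banned_edges C → (∀ x ∈ seen, x ∈ C) → (∀ x ∈ frontier, x ∈ C) →
      ∀ x ∈ (gcsBfsLevel graph banned_edges frontier seen).1, x ∈ C) ∧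
    (∀ v ∈ (gcsBfsLevel graph banned_edges frontier seen).1,
      v ∈ (gcsBfsLevel graph banned_edges frontier seen).2 ∨ (v ∈ seen ∧ v ∉ frontier) ∨
        gcsExp graph banned_edges v (gcsBfsLevel graph banned_edges frontier seen).1) := by
  induction frontier generalizing seen with
  | nil =>
      refine ⟨⟨[], (List.append_nil seen).symm⟩, hsnd, hsk, by simp [gcsBfsLevel], ?_, ?_, ?_, ?_⟩
      · intro _; rfl
      · intro h; exact absurd rfl h
      · intro C _ hs _ x hx; exact hs x hx
      · intro v hv; exact Or.inr (Or.inl ⟨hv, by simp⟩)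
  | cons node rest ih =>
      cases hlk : graph.lookup node with
      | none =>
          have hstep : gcsBfsLevel graph banned_edges (node :: rest) seen
              = gcsBfsLevel graph banned_edges rest seen := by
            simp only [gcsBfsLevel, hlk]
          obtain ⟨c1, c2, c3, c4, c5, c6, c7, c8⟩ := ih seen hsnd hsk
          rw [hstep]
          refine ⟨c1, c2, c3, c4, c5, c6, ?_, ?_⟩
          · intro C hC hs hf x hx
            exact c7 C hC hs (fun y hy => hf y (List.mem_cons_of_mem _ hy)) x hx
          · intro v hv
            rcases c8 v hv with h | ⟨h1, h2⟩ | h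
            · exact Or.inl h
            · by_cases hvn : v = node
              · subst hvn
                refine Or.inr (Or.inr ?_)
                intro p hp hpe _ _ _ _
                exfalso
                obtain ⟨ns', hns'⟩ := gcs_lookup_isSome (graph := graph)
                  (List.mem_map.2 ⟨p, hp, rfl⟩)
                rw [hpe, hlk] at hns'
                simp at hns'
              · exact Or.inr (Or.inl ⟨h1, by simp [hvn, h2]⟩)
            · exact Or.inr (Or.inr h)
      | some ns =>
          have hmemg : (node, ns) ∈ graph := gcs_lookup_mem hlk
          set new := ns.filter (fun n => !(PySem.Set.contains seen n)
              && !(banned_edges.contains (node, n)) && !(banned_edges.contains (n, node)))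
            with hnewdef
          have hstep1 : (gcsBfsLevel graph banned_edges (node :: rest) seen).1
              = (gcsBfsLevel graph banned_edges rest (PySem.Set.update seen new)).1 := by
            simp only [gcsBfsLevel, hlk]
            rfl
          have hstep2 : (gcsBfsLevel graph banned_edges (node :: rest) seen).2
              = new ++ (gcsBfsLevel graph banned_edges rest (PySem.Set.update seen new)).2 := by
            simp only [gcsBfsLevel, hlk]
            rfl
          have hnewns : ∀ n ∈ new, n ∈ ns := fun n hn => List.mem_of_mem_filter hn
          have hnewprops : ∀ n ∈ new, PySem.Set.contains seen n = false ∧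
              banned_edges.contains (node, n) = false ∧
                banned_edges.contains (n, node) = false := by
            intro n hn
            have := List.of_mem_filter hn
            simp only [Bool.and_eq_true, Bool.not_eq_true'] at this
            exact ⟨this.1.1, this.1.2, this.2⟩
          have hnewnotseen : ∀ n ∈ new, n ∉ seen := by
            intro n hn hns
            have := (hnewprops n hn).1
            rw [(PySem.Set.contains_iff seen n).2 hns] at this
            exact absurd this (by simp)
          have hsnd1 : (PySem.Set.update seen new).Nodup := PySem.Set.nodup_update seen new hsnd
          have hsk1 : ∀ x ∈ PySem.Set.update seen new, x ∈ U := by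
            intro x hx
            rcases (PySem.Set.mem_update seen new x).1 hx with h | h
            · exact hsk x h
            · exact hU (node, ns) hmemg x (hnewns x h)
          obtain ⟨⟨t, c1⟩, c2, c3, c4, c5, c6, c7, c8⟩ := ih (PySem.Set.update seen new) hsnd1 hsk1
          obtain ⟨u, hu⟩ : ∃ u, PySem.Set.update seen new = seen ++ u :=
            ⟨_, PySem.Set.update_eq_append_filter seen new⟩
          have hsub1 : ∀ x ∈ PySem.Set.update seen new,
              x ∈ (gcsBfsLevel graph banned_edges rest (PySem.Set.update seen new)).1 := by
            intro x hx; rw [c1]; exact List.mem_append_left _ hx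
          have hseensub : ∀ x ∈ seen,
              x ∈ (gcsBfsLevel graph banned_edges rest (PySem.Set.update seen new)).1 :=
            fun x hx => hsub1 x ((PySem.Set.mem_update seen new x).2 (Or.inl hx))
          have hexpnode : gcsExp graph banned_edges node (PySem.Set.update seen new) := by
            intro p hp hpe n hn hb1 hb2
            have hlkp : graph.lookup p.1 = some p.2 := gcs_lookup_of_mem hnd hp
            rw [hpe, hlk] at hlkp
            have hns : n ∈ ns := (Option.some.inj hlkp) ▸ hn
            by_cases hseen : n ∈ seen
            · exact (PySem.Set.mem_update seen new n).2 (Or.inl hseen)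
            · refine (PySem.Set.mem_update seen new n).2 (Or.inr ?_)
              rw [hnewdef]
              refine List.mem_filter.2 ⟨hns, ?_⟩
              have hc : PySem.Set.contains seen n = false := by
                rw [← Bool.not_eq_true]
                intro hcc
                exact hseen ((PySem.Set.contains_iff seen n).1 hcc)
              simp only [Bool.and_eq_true, Bool.not_eq_true']
              exact ⟨⟨hc, hb1⟩, hb2⟩
          refine ⟨?_, by rw [hstep1]; exact c2, ?_, ?_, ?_, ?_, ?_, ?_⟩
          · exact ⟨u ++ t, by rw [hstep1, c1, hu, List.append_assoc]⟩
          · intro x hx; rw [hstep1] at hx; exact c3 x hx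
          · intro x hx
            rw [hstep2] at hx
            rw [hstep1]
            rcases List.mem_append.1 hx with h | h
            · exact hsub1 x ((PySem.Set.mem_update seen new x).2 (Or.inr h))
            · exact c4 x h
          · intro hnil
            rw [hstep2] at hnil
            rcases List.append_eq_nil_iff.1 hnil with ⟨hn1, hn2⟩
            have hupd : PySem.Set.update seen new = seen := by rw [hn1]; rfl
            rw [hstep1, c5 hn2, hupd]
          · intro hne
            rw [hstep2] at hne
            rw [hstep1]
            cases hne2 : new with
            | nil =>
                have hupd : PySem.Set.update seen new = seen := by rw [hne2]; rfl
                have hrestne : (gcsBfsLevel graph banned_edges rest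
                    (PySem.Set.update seen new)).2 ≠ [] := by
                  intro h0; exact hne (by rw [h0, List.append_nil, hne2])
                have := c6 hrestne
                rwa [hupd] at this
            | cons n0 tl =>
                have hn0new : n0 ∈ new := by rw [hne2]; exact List.mem_cons_self
                have hn0 : n0 ∈ (gcsBfsLevel graph banned_edges rest
                    (PySem.Set.update seen new)).1 :=
                  hsub1 n0 ((PySem.Set.mem_update seen new n0).2 (Or.inr hn0new))
                have hn0ns : n0 ∉ seen := hnewnotseen n0 hn0new
                have hall : (gcsBfsLevel graph banned_edges rest
                    (PySem.Set.update seen new)).1 = seen ++ (u ++ t) := by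
                  rw [c1, hu, List.append_assoc]
                have hut : u ++ t ≠ [] := by
                  intro h0
                  rw [hall, h0, List.append_nil] at hn0
                  exact hn0ns hn0
                rw [← hne2, hall, List.length_append]
                have := List.length_pos_iff.2 hut
                omega
          · intro C hC hs hf x hx
            rw [hstep1] at hx
            have hs1 : ∀ y ∈ PySem.Set.update seen new, y ∈ C := by
              intro y hy
              rcases (PySem.Set.mem_update seen new y).1 hy with h | h
              · exact hs y h
              · exact hC (node, ns) hmemg (hf node List.mem_cons_self) y (hnewns y h)
                  (hnewprops y h).2.1 (hnewprops y h).2.2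
            exact c7 C hC hs1 (fun y hy => hf y (List.mem_cons_of_mem _ hy)) x hx
          · intro v hv
            rw [hstep1] at hv
            rcases c8 v hv with h | ⟨h1, h2⟩ | h
            · exact Or.inl (by rw [hstep2]; exact List.mem_append_right _ h)
            · rcases (PySem.Set.mem_update seen new v).1 h1 with hvs | hvn
              · by_cases hveq : v = node
                · subst hveq
                  refine Or.inr (Or.inr ?_)
                  rw [hstep1]
                  exact gcsExp_mono hexpnode hsub1
                · exact Or.inr (Or.inl ⟨hvs, by simp [hveq, h2]⟩)
              · exact Or.inl (by rw [hstep2]; exact List.mem_append_left _ hvn)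
            · exact Or.inr (Or.inr (by rw [hstep1]; exact h))

theorem gcsBfs_nil (graph : List (String × List String)) (banned_edges : List (String × String))
    (f : Nat) (seen : PySem.Set String) : gcsBfs graph banned_edges f [] seen = seen := by
  cases f <;> rfl

theorem gcsBfs_spec (graph : List (String × List String)) (banned_edges : List (String × String))
    (hnd : (graph.map Prod.fst).Nodup)
    (U : List String) (hU : ∀ p ∈ graph, ∀ n ∈ p.2, n ∈ U)
    (fuel : Nat) (frontier : List String) (seen : List String)
    (hsnd : seen.Nodup)
    (hsk : ∀ x ∈ seen, x ∈ U)
    (hfr : ∀ x ∈ frontier, x ∈ seen)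
    (hexp : ∀ v ∈ seen, v ∈ frontier ∨ gcsExp graph banned_edges v seen)
    (hfuel : U.length - seen.length < fuel) :
    (gcsBfs graph banned_edges fuel frontier seen).Nodup ∧
    (∀ x ∈ seen, x ∈ gcsBfs graph banned_edges fuel frontier seen) ∧
    gcsClosed graph banned_edges (gcsBfs graph banned_edges fuel frontier seen) ∧
    (∀ C, gcsClosed graph banned_edges C → (∀ x ∈ seen, x ∈ C) →
      ∀ x ∈ gcsBfs graph banned_edges fuel frontier seen, x ∈ C) := by
  induction fuel generalizing frontier seen with
  | zero => exact absurd hfuel (by omega)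
  | succ f ih =>
      cases frontier with
      | nil =>
          have hres : gcsBfs graph banned_edges (f + 1) [] seen = seen := rfl
          rw [hres]
          refine ⟨hsnd, fun x hx => hx, ?_, fun C _ hs x hx => hs x hx⟩
          intro p hp hpin n hn hb1 hb2
          rcases hexp p.1 hpin with h | h
          · simp at h
          · exact h p hp rfl n hn hb1 hb2
      | cons node rest =>
          obtain ⟨⟨t, c1⟩, c2, c3, c4, c5, c6, c7, c8⟩ :=
            gcsBfsLevel_spec graph banned_edges hnd U hU (node :: rest) seen hsnd hsk
          have hstep : gcsBfs graph banned_edges (f + 1) (node :: rest) seen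
              = gcsBfs graph banned_edges f
                  (gcsBfsLevel graph banned_edges (node :: rest) seen).2
                  (gcsBfsLevel graph banned_edges (node :: rest) seen).1 := rfl
          have hexp' : ∀ v ∈ (gcsBfsLevel graph banned_edges (node :: rest) seen).1,
              v ∈ (gcsBfsLevel graph banned_edges (node :: rest) seen).2 ∨
                gcsExp graph banned_edges v
                  (gcsBfsLevel graph banned_edges (node :: rest) seen).1 := by
            intro v hv
            rcases c8 v hv with h | ⟨h1, h2⟩ | h
            · exact Or.inl h
            · rcases hexp v h1 with hf | he
              · exact absurd hf h2
              · exact Or.inr (gcsExp_mono he (fun x hx => by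
                  rw [c1]; exact List.mem_append_left _ hx))
            · exact Or.inr h
          cases hne : (gcsBfsLevel graph banned_edges (node :: rest) seen).2 with
          | nil =>
              have hseen : (gcsBfsLevel graph banned_edges (node :: rest) seen).1 = seen :=
                c5 hne
              have hres : gcsBfs graph banned_edges (f + 1) (node :: rest) seen = seen := by
                rw [hstep, hne, gcsBfs_nil, hseen]
              rw [hres]
              refine ⟨hsnd, fun x hx => hx, ?_, fun C _ hs x hx => hs x hx⟩
              intro p hp hpin n hn hb1 hb2
              have := hexp' p.1 (by rw [hseen]; exact hpin)
              rcases this with h | h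
              · rw [hne] at h; simp at h
              · have := h p hp rfl n hn hb1 hb2
                rwa [hseen] at this
          | cons m ms =>
              have hne2 : (gcsBfsLevel graph banned_edges (node :: rest) seen).2 ≠ [] := by
                rw [hne]; simp
              have hgrow := c6 hne2
              have hbound : (gcsBfsLevel graph banned_edges (node :: rest) seen).1.length
                  ≤ U.length := gcs_nodup_length_le c2 c3
              obtain ⟨r1, r2, r3, r4⟩ := ih
                (gcsBfsLevel graph banned_edges (node :: rest) seen).2
                (gcsBfsLevel graph banned_edges (node :: rest) seen).1
                c2 c3 c4 hexp' (by omega)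
              rw [hstep]
              refine ⟨r1, ?_, r3, ?_⟩
              · intro x hx
                exact r2 x (by rw [c1]; exact List.mem_append_left _ hx)
              · intro C hC hs x hx
                exact r4 C hC (c7 C hC hs (fun y hy => hs y (hfr y hy))) x hx

-- ===== VERDICT (by name: the statement is the Claim_ definition above) =====
theorem get_component_size_spec : Claim_equal_get_component_size := by
  intro graph root banned_edges _ hpre
  obtain ⟨hnd, -⟩ := hpre
  unfold Spec_get_component_size get_component_size get_component_size_alt
  have hof : PySem.Set.ofList [root] = [root] := rfl
  rw [hof]
  have hU : ∀ p ∈ graph, ∀ n ∈ p.2, n ∈ root :: graph.flatMap (fun p => p.2) := by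
    intro p hp n hn
    exact List.mem_cons_of_mem _ (List.mem_flatMap.2 ⟨p, hp, hn⟩)
  have hUlen : (root :: graph.flatMap (fun p => p.2)).length
      = (graph.map (fun p => p.2.length)).sum + 1 := by
    simp [List.length_flatMap]
  have hsnd0 : ([root] : List String).Nodup := List.nodup_singleton root
  have hsk0 : ∀ x ∈ ([root] : List String), x ∈ root :: graph.flatMap (fun p => p.2) := by
    intro x hx
    rw [List.mem_singleton] at hx
    exact hx ▸ List.mem_cons_self
  have hfuelA : ((root :: graph.flatMap (fun p => p.2)).length - ([root] : List String).length) *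
      ((graph.map (fun p => p.2.length)).sum + 1) + ([root] : List String).length
      < (((graph.map (fun p => p.2.length)).sum + 2)
        * ((graph.map (fun p => p.2.length)).sum + 2)) := by
    rw [hUlen]
    simp only [List.length_singleton, Nat.add_sub_cancel]
    have h2 : ((graph.map (fun p => p.2.length)).sum + 2)
        * ((graph.map (fun p => p.2.length)).sum + 2)
        = (graph.map (fun p => p.2.length)).sum * ((graph.map (fun p => p.2.length)).sum + 1)
          + 3 * (graph.map (fun p => p.2.length)).sum + 4 := by ring
    omega
  obtain ⟨a1, a2, a3, a4⟩ := gcsDfs_spec graph banned_edges hnd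
    (root :: graph.flatMap (fun p => p.2)) hU
    (((graph.map (fun p => p.2.length)).sum + 2) * ((graph.map (fun p => p.2.length)).sum + 2))
    [root] [root] hsnd0 hsk0 (fun x hx => hx) (fun v hv => Or.inl hv) hfuelA
  obtain ⟨b1, b2, b3, b4⟩ := gcsBfs_spec graph banned_edges hnd
    (root :: graph.flatMap (fun p => p.2)) hU
    ((graph.map (fun p => p.2.length)).sum + 2) [root] [root] hsnd0 hsk0
    (fun x hx => hx) (fun v hv => Or.inl hv) (by rw [hUlen]; simp)
  have hrootA : root ∈ gcsDfs graph banned_edges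
      (((graph.map (fun p => p.2.length)).sum + 2) * ((graph.map (fun p => p.2.length)).sum + 2))
      [root] [root] :=
    a2 root (List.mem_singleton_self root)
  have hrootB : root ∈ gcsBfs graph banned_edges
      ((graph.map (fun p => p.2.length)).sum + 2) [root] [root] :=
    b2 root (List.mem_singleton_self root)
  have hAB : ∀ x, x ∈ gcsDfs graph banned_edges
      (((graph.map (fun p => p.2.length)).sum + 2) * ((graph.map (fun p => p.2.length)).sum + 2))
      [root] [root] ↔
      x ∈ gcsBfs graph banned_edges ((graph.map (fun p => p.2.length)).sum + 2) [root] [root] := by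
    intro x
    constructor
    · intro hx
      exact a4 _ b3 (fun y hy => (List.mem_singleton.1 hy) ▸ hrootB) x hx
    · intro hx
      exact b4 _ a3 (fun y hy => (List.mem_singleton.1 hy) ▸ hrootA) x hx
  have hperm := (List.perm_ext_iff_of_nodup a1 b1).2 hAB
  exact congrArg Int.ofNat hperm.length_eq
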